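-- pv_equiv track=rewrite | github.com/mmcclung64/synexis-rep-agent | pipeline/chunk.py | _chunk_page
-- ===== SOURCE A (Python) =====
-- from typing import List, Optional
--
-- TARGET_TOKENS = 400
--
-- def _chunk_page(
--     sentences: List[tuple[str, bool, int]],
--     target: int = TARGET_TOKENS,
-- ) -> List[tuple[str, bool, int]]:
--     """Group sentences into chunks. Returns list of (text, has_efficacy_claim, token_count).
--
--     Never splits a sentence. If a single sentence exceeds `target`, it occupies
--     its own chunk regardless of size.
--     """
--     chunks: List[tuple[str, bool, int]] = []
--     cur: List[str] = []
--     cur_tokens = 0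
--     cur_flag = False
--
--     for sent, flag, tok in sentences:
--         if cur and cur_tokens + tok > target:
--             chunks.append(("\n".join(cur), cur_flag, cur_tokens))
--             cur, cur_tokens, cur_flag = [], 0, False
--         cur.append(sent)
--         cur_tokens += tok
--         cur_flag = cur_flag or flag
--
--     if cur:
--         chunks.append(("\n".join(cur), cur_flag, cur_tokens))
--     return chunks
-- ===== SOURCE B (Python) =====
-- from typing import List
--
-- TARGET_TOKENS = 400
--
-- def _chunk_page(
--     sentences: List[tuple[str, bool, int]],
--     target: int = TARGET_TOKENS,
-- ) -> List[tuple[str, bool, int]]: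
--     # Pass 1: assign a group id to every sentence (same greedy boundary test).
--     labels = []
--     gid, run = 0, 0
--     for _, _, tok in sentences:
--         if labels and run + tok > target:
--             gid, run = gid + 1, 0
--         labels.append(gid)
--         run += tok
--     # Pass 2: aggregate each run of equal labels into one chunk.
--     pairs = list(zip(labels, sentences))
--     out = []
--     i = 0
--     while i < len(pairs):
--         g = pairs[i][0]
--         j = i
--         while j < len(pairs) and pairs[j][0] == g:
--             j += 1
--         grp = [s for _, s in pairs[i:j]]
--         out.append(("\n".join(t for t, _, _ in grp),
--                     any(f for _, f, _ in grp),
--                     sum(k for _, _, k in grp)))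
--         i = j
--     return out
-- ===== Notes on version B (the rewrite author's own statement) =====
-- stated objective: alternative
-- what changed: Replaces the single stateful accumulate-and-flush loop by two separate passes: first label every sentence with a group id using the same greedy boundary test, then aggregate each run of equal labels into ('\n'.join(texts), any(flags), sum(tokens)).
import Mathlib
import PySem

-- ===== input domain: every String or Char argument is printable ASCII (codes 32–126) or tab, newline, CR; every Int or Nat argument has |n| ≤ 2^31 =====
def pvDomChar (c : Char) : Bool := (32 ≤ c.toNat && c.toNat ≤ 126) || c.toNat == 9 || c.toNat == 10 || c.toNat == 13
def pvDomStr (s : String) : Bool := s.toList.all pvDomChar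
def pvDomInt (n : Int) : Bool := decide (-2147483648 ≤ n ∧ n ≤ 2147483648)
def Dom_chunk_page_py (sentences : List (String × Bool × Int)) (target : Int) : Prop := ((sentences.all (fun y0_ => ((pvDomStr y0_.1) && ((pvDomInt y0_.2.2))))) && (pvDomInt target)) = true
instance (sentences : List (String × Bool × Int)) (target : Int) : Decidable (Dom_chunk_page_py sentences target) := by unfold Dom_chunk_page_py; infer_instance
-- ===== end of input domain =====

-- B replaces the single stateful accumulation loop by two passes — label each
-- sentence with a group id, then aggregate runs of equal labels ("alternative"
-- decomposition; same cost, no speed claim).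

-- ===== PORT A =====
-- the for-loop of _chunk_page, state (chunks, cur, cur_tokens, cur_flag)
def chunkPageLoop (target : Int) (xs : List (String × Bool × Int))
    (chunks : List (String × Bool × Int)) (cur : List String)
    (curTokens : Int) (curFlag : Bool) : List (String × Bool × Int) :=
  match xs with
  | [] =>
    if cur ≠ [] then chunks ++ [(PySem.Str.join "\n" cur, curFlag, curTokens)] else chunks
  | (sent, flag, tok) :: rest =>
    if cur ≠ [] ∧ curTokens + tok > target then
      -- emit current chunk, reset, then append (cur=[sent], tokens=tok, flag=flag)
      chunkPageLoop target rest (chunks ++ [(PySem.Str.join "\n" cur, curFlag, curTokens)])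
        [sent] tok flag
    else
      chunkPageLoop target rest chunks (cur ++ [sent]) (curTokens + tok) (curFlag || flag)

def chunk_page_py (sentences : List (String × Bool × Int)) (target : Int) :
    List (String × Bool × Int) :=
  chunkPageLoop target sentences [] [] 0 false

-- ===== PORT B =====
-- pass 1: the labelled zip `pairs` — each sentence tagged with its group id
def chunkLabels (target : Int) : List (String × Bool × Int) → Int → Int → Bool →
    List (Int × (String × Bool × Int))
  | [], _, _, _ => []
  | (s, f, t) :: rest, gid, run, started =>
    if started ∧ run + t > target then
      (gid + 1, (s, f, t)) :: chunkLabels target rest (gid + 1) t true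
    else
      (gid, (s, f, t)) :: chunkLabels target rest gid (run + t) true

-- the ("\n".join, any, sum) aggregation of one group
def aggChunk (grp : List (String × Bool × Int)) : String × Bool × Int :=
  (PySem.Str.join "\n" (grp.map (·.1)), grp.any (·.2.1), (grp.map (·.2.2)).sum)

-- pass 2: the while-loop — scan a run of equal labels, aggregate it, continue after it
def aggGroups : List (Int × (String × Bool × Int)) → List (String × Bool × Int)
  | [] => []
  | (g, x) :: rest =>
    aggChunk (x :: (rest.takeWhile (fun p => p.1 == g)).map Prod.snd)
      :: aggGroups (rest.dropWhile (fun p => p.1 == g))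
  termination_by ls => ls.length
  decreasing_by
    simp only [List.length_cons]
    exact Nat.lt_succ_of_le (List.length_dropWhile_le _ _)

def chunk_page_py_alt (sentences : List (String × Bool × Int)) (target : Int) :
    List (String × Bool × Int) :=
  aggGroups (chunkLabels target sentences 0 0 false)

-- ===== PRECONDITION & SPEC =====
def Spec_chunk_page_py (sentences : List (String × Bool × Int)) (target : Int) (out : List (String × Bool × Int)) : Prop := out = chunk_page_py_alt sentences target
instance (sentences : List (String × Bool × Int)) (target : Int) (out : List (String × Bool × Int)) : Decidable (Spec_chunk_page_py sentences target out) := by unfold Spec_chunk_page_py; infer_instance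

-- ===== CLAIM (what is proved, stated in full; the proofs are below) =====
def Claim_equal_chunk_page_py : Prop := ∀ (sentences : List (String × Bool × Int)) (target : Int), Dom_chunk_page_py sentences target → Spec_chunk_page_py sentences target (chunk_page_py sentences target)

-- ===== LEMMAS AND PROOFS =====

-- proof-side generalisation of aggChunk: a pending partial chunk (texts, cf, ct) merged
-- with further items of the same group
def agg2 (texts : List String) (cf : Bool) (ct : Int)
    (items : List (String × Bool × Int)) : String × Bool × Int :=
  (PySem.Str.join "\n" (texts ++ items.map (·.1)), cf || items.any (·.2.1),
    ct + (items.map (·.2.2)).sum)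

-- the chunks still to be emitted, given pending (texts, cf, ct), current group id g,
-- and the labelled remainder ls
def mergeFirst (texts : List String) (cf : Bool) (ct : Int) (g : Int)
    (ls : List (Int × (String × Bool × Int))) : List (String × Bool × Int) :=
  agg2 texts cf ct ((ls.takeWhile (fun p => p.1 == g)).map Prod.snd)
    :: aggGroups (ls.dropWhile (fun p => p.1 == g))

lemma aggGroups_cons (g : Int) (s : String) (f : Bool) (t : Int)
    (ls : List (Int × (String × Bool × Int))) :
    aggGroups ((g, (s, f, t)) :: ls) = mergeFirst [s] f t g ls := by
  rw [aggGroups]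
  simp [mergeFirst, aggChunk, agg2]

lemma loop_eq (target : Int) :
    ∀ (xs : List (String × Bool × Int)) (g : Int) (cur : List String)
      (ct : Int) (cf : Bool) (chunks : List (String × Bool × Int)),
      cur ≠ [] →
      chunkPageLoop target xs chunks cur ct cf =
        chunks ++ mergeFirst cur cf ct g (chunkLabels target xs g ct true) := by
  intro xs
  induction xs with
  | nil =>
    intro g cur ct cf chunks hne
    simp [chunkPageLoop, chunkLabels, mergeFirst, agg2, aggGroups, hne]
  | cons hd rest ih =>
    obtain ⟨s, f, t⟩ := hd
    intro g cur ct cf chunks hne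
    by_cases h : ct + t > target
    · rw [chunkPageLoop]
      rw [if_pos ⟨hne, h⟩]
      rw [ih (g + 1) [s] t f _ (by simp)]
      rw [chunkLabels, if_pos ⟨rfl, h⟩]
      have hgg : ((g + 1 : Int) == g) = false := by
        simp [beq_eq_false_iff_ne]
      simp only [mergeFirst, List.takeWhile_cons, List.dropWhile_cons, hgg,
        Bool.false_eq_true, if_false, List.map_nil]
      rw [aggGroups_cons]
      simp [agg2, mergeFirst, List.append_assoc]
    · rw [chunkPageLoop]
      rw [if_neg (by intro hc; exact h hc.2)]
      rw [ih g (cur ++ [s]) (ct + t) (cf || f) _ (by simp)]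
      rw [chunkLabels, if_neg (by intro hc; exact h hc.2)]
      simp only [mergeFirst, List.takeWhile_cons, List.dropWhile_cons, beq_self_eq_true,
        if_true, List.map_cons]
      simp [agg2, Bool.or_assoc, add_assoc, List.append_assoc]

-- ===== VERDICT (by name: the statement is the Claim_ definition above) =====
theorem chunk_page_py_spec : Claim_equal_chunk_page_py := by
  intro sentences target _
  unfold Spec_chunk_page_py chunk_page_py chunk_page_py_alt
  cases sentences with
  | nil => simp [chunkPageLoop, chunkLabels, aggGroups]
  | cons hd rest =>
    obtain ⟨s, f, t⟩ := hd
    rw [chunkPageLoop, if_neg (by simp)]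
    rw [chunkLabels, if_neg (by simp)]
    rw [aggGroups_cons]
    rw [show ([] ++ [s] : List String) = [s] from rfl, loop_eq target rest 0 [s] (0 + t) (false || f) [] (by simp)]
    simp
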